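-- pv_equiv track=rewrite | github.com/OpenDCAI/Paper2Any | gradio_app/pages/PA_frontend.py | _parse_arguments_str
-- ===== SOURCE A (Python) =====
-- from typing import List, Tuple
--
-- def _parse_arguments_str(arguments_text: str) -> List[str]:
--     if not arguments_text:
--         return []
--     separators = [",", "\n", " "]
--     tokens = [arguments_text]
--     for sep in separators:
--         new_tokens: List[str] = []
--         for t in tokens:
--             new_tokens.extend(t.split(sep))
--         tokens = new_tokens
--     return [t.strip() for t in tokens if t and t.strip()]
-- ===== SOURCE B (Python) =====
-- from typing import List
--
-- def _parse_arguments_str(arguments_text: str) -> List[str]: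
--     # single left-to-right scan with an explicit current-token buffer
--     out: List[str] = []
--     cur: List[str] = []
--     for ch in arguments_text + ",":
--         if ch in (",", "\n", " "):
--             tok = "".join(cur).strip()
--             if tok:
--                 out.append(tok)
--             cur = []
--         else:
--             cur.append(ch)
--     return out
-- ===== Notes on version B (the rewrite author's own statement) =====
-- stated objective: alternative
-- what changed: Replaced the three cascading split passes (building an intermediate token list per separator) plus a final filter/strip comprehension with a single left-to-right character scan that flushes, strips and emits each token as soon as a separator is seen.
import Mathlib
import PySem

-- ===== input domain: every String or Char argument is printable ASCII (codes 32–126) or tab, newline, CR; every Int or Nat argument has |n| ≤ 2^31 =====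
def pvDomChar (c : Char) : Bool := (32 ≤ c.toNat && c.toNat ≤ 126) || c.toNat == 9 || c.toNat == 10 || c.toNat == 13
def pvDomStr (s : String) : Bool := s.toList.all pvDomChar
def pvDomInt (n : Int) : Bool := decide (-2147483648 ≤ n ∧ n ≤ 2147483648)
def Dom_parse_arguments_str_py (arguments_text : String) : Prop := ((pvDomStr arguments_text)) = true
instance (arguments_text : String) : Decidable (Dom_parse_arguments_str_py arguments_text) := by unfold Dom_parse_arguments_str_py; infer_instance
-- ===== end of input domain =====

-- B replaces A's three cascading split passes by a single character scan that flushes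
-- each token at a separator (objective: alternative single-pass decomposition).

-- ===== PORT A =====
def parse_arguments_str_py (arguments_text : String) : List String :=
  if arguments_text = "" then []
  else
    let separators : List (List Char) := [[','], ['\n'], [' ']]
    let tokens : List (List Char) := separators.foldl
      (fun tokens sep => tokens.foldl
        (fun new_tokens t => new_tokens ++ PySem.Chars.splitOn t sep) [])
      [arguments_text.toList]
    (tokens.filter (fun t => !t.isEmpty && !(PySem.Chars.strip t).isEmpty)).map
      (fun t => String.ofList (PySem.Chars.strip t))

-- ===== PORT B =====
-- one scan step: flush the current buffer at a separator, else extend it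
def pvAltStep (acc : List String × List Char) (ch : Char) : List String × List Char :=
  if ch == ',' || ch == '\n' || ch == ' ' then
    let tok := PySem.Chars.strip acc.2
    (if tok.isEmpty then acc.1 else acc.1 ++ [String.ofList tok], [])
  else (acc.1, acc.2 ++ [ch])

def parse_arguments_str_py_alt (arguments_text : String) : List String :=
  ((arguments_text.toList ++ [',']).foldl pvAltStep ([], [])).1

-- ===== PRECONDITION & SPEC =====
def Spec_parse_arguments_str_py (arguments_text : String) (out : List String) : Prop := out = parse_arguments_str_py_alt arguments_text
instance (arguments_text : String) (out : List String) : Decidable (Spec_parse_arguments_str_py arguments_text out) := by unfold Spec_parse_arguments_str_py; infer_instance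

-- ===== CLAIM (what is proved, stated in full; the proofs are below) =====
def Claim_equal_parse_arguments_str_py : Prop := ∀ (arguments_text : String), Dom_parse_arguments_str_py arguments_text → Spec_parse_arguments_str_py arguments_text (parse_arguments_str_py arguments_text)

-- ===== LEMMAS AND PROOFS =====

-- the separator predicate shared by both characterisations
def pvSep (c : Char) : Bool := c == ',' || c == '\n' || c == ' '

-- what both programs emit from a token list: strip, drop empties
def pvEmit (ts : List (List Char)) : List String :=
  (ts.filter (fun t => !(PySem.Chars.strip t).isEmpty)).map
    (fun t => String.ofList (PySem.Chars.strip t))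

theorem pvEmit_nil : pvEmit [] = [] := rfl

theorem pvEmit_cons (t : List Char) (ts : List (List Char)) :
    pvEmit (t :: ts) =
      (if (PySem.Chars.strip t).isEmpty then [] else [String.ofList (PySem.Chars.strip t)]) ++ pvEmit ts := by
  by_cases h : (PySem.Chars.strip t).isEmpty <;> simp [pvEmit, h]

theorem pv_modifyHead_append {α : Type} (f : List α → List α) (xs ys : List (List α))
    (h : xs ≠ []) : (xs ++ ys).modifyHead f = xs.modifyHead f ++ ys := by
  cases xs with
  | nil => exact absurd rfl h
  | cons a l => simp

-- characterisation of PySem's fuel-based splitOn for a single-character separator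
theorem pv_modifyHead_fun_id {α : Type} (l : List α) :
    List.modifyHead (fun x => x) l = l := by cases l <;> simp

theorem pv_go_spec (c : Char) (l : List Char) : ∀ (fuel : Nat) (cur : List Char)
    (acc : List (List Char)), l.length < fuel →
    PySem.Chars.splitOn.go [c] fuel l cur acc =
      acc.reverse ++ (l.splitOnP (· == c)).modifyHead (cur.reverse ++ ·) := by
  induction l with
  | nil =>
    intro fuel cur acc h
    cases fuel with
    | zero => omega
    | succ f => simp [PySem.Chars.splitOn.go, List.splitOnP_nil]
  | cons a rest ih =>
    intro fuel cur acc h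
    cases fuel with
    | zero => omega
    | succ f =>
      by_cases hc : a = c
      · subst hc
        rw [show PySem.Chars.splitOn.go [a] (f+1) (a :: rest) cur acc =
            PySem.Chars.splitOn.go [a] f rest [] (cur.reverse :: acc) by
          simp [PySem.Chars.splitOn.go, List.isPrefixOf]]
        rw [ih f [] (cur.reverse :: acc) (by simpa using Nat.lt_of_succ_lt_succ h)]
        obtain ⟨h0, t0, he⟩ := List.exists_cons_of_ne_nil (List.splitOnP_ne_nil (· == a) rest)
        simp [List.splitOnP_cons, he]
      · rw [show PySem.Chars.splitOn.go [c] (f+1) (a :: rest) cur acc =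
            PySem.Chars.splitOn.go [c] f rest (a :: cur) acc by
          have hc' : ¬ c = a := fun h => hc h.symm
          simp [PySem.Chars.splitOn.go, List.isPrefixOf, hc']]
        rw [ih f (a :: cur) acc (by simpa using Nat.lt_of_succ_lt_succ h)]
        obtain ⟨h0, t0, he⟩ := List.exists_cons_of_ne_nil (List.splitOnP_ne_nil (· == c) rest)
        simp [List.splitOnP_cons, hc, he]

theorem pv_splitOn_single (c : Char) (l : List Char) :
    PySem.Chars.splitOn l [c] = l.splitOnP (· == c) := by
  have := pv_go_spec c l (l.length + 1) [] [] (by omega)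
  simpa [PySem.Chars.splitOn, pv_modifyHead_fun_id] using this

-- cascading two splitOnP passes is one pass on the disjunction
theorem pv_split_cascade (p q : Char → Bool) (l : List Char) :
    (l.splitOnP p).flatMap (fun t => t.splitOnP q) = l.splitOnP (fun c => p c || q c) := by
  induction l with
  | nil => simp [List.splitOnP_nil]
  | cons a rest ih =>
    obtain ⟨h0, t0, he⟩ := List.exists_cons_of_ne_nil (List.splitOnP_ne_nil p rest)
    by_cases hp : p a
    · simp [List.splitOnP_cons, hp, ← ih]
    · by_cases hq : q a
      · rw [List.splitOnP_cons, if_neg (by simp [hp]), List.splitOnP_cons,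
          if_pos (by simp [hp, hq]), ← ih, he]
        simp [List.splitOnP_cons, hq]
      · rw [List.splitOnP_cons, if_neg (by simp [hp]), List.splitOnP_cons,
          if_neg (by simp [hp, hq]), ← ih, he]
        simp only [List.modifyHead_cons, List.flatMap_cons]
        rw [pv_modifyHead_append _ _ _ (List.splitOnP_ne_nil q h0)]
        simp [List.splitOnP_cons, hq]

-- A's token list (for nonempty input) is one splitOnP on the separator set
theorem pv_A_tokens (l : List Char) :
    ([[','], ['\n'], [' ']] : List (List Char)).foldl
      (fun tokens sep => tokens.foldl
        (fun new_tokens t => new_tokens ++ PySem.Chars.splitOn t sep) [])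
      [l] = l.splitOnP pvSep := by
  have hfl : ∀ (sep : List Char) (ts : List (List Char)),
      ts.foldl (fun new_tokens t => new_tokens ++ PySem.Chars.splitOn t sep) [] =
        ts.flatMap (fun t => PySem.Chars.splitOn t sep) := by
    intro sep ts
    have : ∀ (pre : List (List Char)),
        ts.foldl (fun new_tokens t => new_tokens ++ PySem.Chars.splitOn t sep) pre =
          pre ++ ts.flatMap (fun t => PySem.Chars.splitOn t sep) := by
      induction ts with
      | nil => simp
      | cons t ts ih => intro pre; simp [List.foldl_cons, ih]
    simpa using this []
  simp only [List.foldl_cons, List.foldl_nil, hfl]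
  simp only [List.flatMap_cons, List.flatMap_nil, List.append_nil, pv_splitOn_single]
  rw [pv_split_cascade, pv_split_cascade]
  rfl

-- B's scan, characterised against the same splitOnP
theorem pv_B_loop (l : List Char) : ∀ (out : List String) (cur : List Char),
    ((l ++ [',']).foldl pvAltStep (out, cur)).1 =
      out ++ pvEmit ((l.splitOnP pvSep).modifyHead (cur ++ ·)) := by
  induction l with
  | nil =>
    intro out cur
    by_cases h : (PySem.Chars.strip cur).isEmpty <;>
      simp [pvAltStep, List.splitOnP_nil, pvEmit_cons, pvEmit_nil, h]
  | cons a rest ih =>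
    intro out cur
    by_cases hs : pvSep a
    · have hstep : pvAltStep (out, cur) a =
          (out ++ (if (PySem.Chars.strip cur).isEmpty then []
                   else [String.ofList (PySem.Chars.strip cur)]), []) := by
        rw [pvAltStep, if_pos (by simpa [pvSep] using hs)]
        by_cases h : (PySem.Chars.strip cur).isEmpty <;> simp [h]
      rw [List.cons_append, List.foldl_cons, hstep, ih]
      obtain ⟨h0, t0, he⟩ := List.exists_cons_of_ne_nil (List.splitOnP_ne_nil pvSep rest)
      simp [List.splitOnP_cons, hs, pvEmit_cons, pv_modifyHead_fun_id]
    · have hstep : pvAltStep (out, cur) a = (out, cur ++ [a]) := by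
        rw [pvAltStep, if_neg (by simpa [pvSep] using hs)]
      rw [List.cons_append, List.foldl_cons, hstep, ih]
      obtain ⟨h0, t0, he⟩ := List.exists_cons_of_ne_nil (List.splitOnP_ne_nil pvSep rest)
      simp [List.splitOnP_cons, hs, he]

theorem pv_strip_nil : PySem.Chars.strip [] = [] := rfl

-- ===== VERDICT (by name: the statement is the Claim_ definition above) =====
theorem parse_arguments_str_py_spec : Claim_equal_parse_arguments_str_py := by
  intro s _
  unfold Spec_parse_arguments_str_py parse_arguments_str_py parse_arguments_str_py_alt
  rw [pv_B_loop s.toList [] []]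
  by_cases hs : s = ""
  · subst hs
    simp [List.splitOnP_nil, pvEmit_cons, pvEmit_nil, pv_strip_nil]
  · rw [if_neg hs]
    simp only [pv_A_tokens]
    obtain ⟨h0, t0, he⟩ := List.exists_cons_of_ne_nil (List.splitOnP_ne_nil pvSep s.toList)
    have hfil : (fun t : List Char => !t.isEmpty && !(PySem.Chars.strip t).isEmpty) =
        (fun t : List Char => !(PySem.Chars.strip t).isEmpty) := by
      funext t
      cases t with
      | nil => simp [pv_strip_nil]
      | cons a l => simp
    rw [he]
    simp only [List.modifyHead_cons, List.nil_append, hfil]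
    rfl
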